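-- pv_equiv track=rewrite | github.com/mathewthe2/Game2Text | util.py | quick_remove_repeated_phrases
-- ===== SOURCE A (Python) =====
-- def quick_remove_repeated_phrases(s):
--     prefix_array = []
--     for i in range(len(s)):
--         prefix_array.append(s[:i])
--
--     # stop at 1st element to avoid checking for the ' ' char
--     for i in prefix_array[:1:-1]:
--         if s.count(i) > 1:
--             # find where the next repetition starts
--             offset = s[len(i) :].find(i)
--
--             return s[: len(i) + offset]
--             break
--
--     return s
-- ===== SOURCE B (Python) =====
-- def quick_remove_repeated_phrases(s):
--     n = len(s)
--     # best = longest l such that the prefix s[:l] occurs again at some position >= l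
--     best = 0
--     for j in range(1, n):
--         # length of the common prefix of s and s[j:]
--         k = 0
--         while j + k < n and s[j + k] == s[k]:
--             k += 1
--         if min(j, k) > best:
--             best = min(j, k)
--     if best < 2:
--         return s
--     return s[:s.find(s[:best], best)]
-- ===== Notes on version B (the rewrite author's own statement) =====
-- stated objective: faster
-- what changed: Instead of materialising every prefix and calling str.count over the whole string for each prefix length (longest first), B makes one pass over candidate positions j, keeping best = max min(j, lcp(s, s[j:])) where lcp is computed by direct character comparison, then does a single find; this drops A's O(n^2) prefix construction and O(n) count calls of O(n*l) each.
import Mathlib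
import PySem

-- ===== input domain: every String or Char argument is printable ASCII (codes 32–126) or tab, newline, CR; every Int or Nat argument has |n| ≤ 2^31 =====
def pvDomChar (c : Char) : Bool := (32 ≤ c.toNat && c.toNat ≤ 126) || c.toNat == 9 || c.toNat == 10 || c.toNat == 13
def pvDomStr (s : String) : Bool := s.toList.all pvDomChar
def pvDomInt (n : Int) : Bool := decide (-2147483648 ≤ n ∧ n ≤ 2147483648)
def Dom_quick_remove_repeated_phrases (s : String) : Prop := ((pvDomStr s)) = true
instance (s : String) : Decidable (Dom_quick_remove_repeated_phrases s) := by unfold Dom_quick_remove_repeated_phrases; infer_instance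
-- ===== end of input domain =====

-- B replaces A's prefix-array + per-length str.count scan by one pass over positions j
-- keeping best = max min(j, lcp(s, s[j:])) plus a single find (measured faster in a timing run).

-- ===== PORT A =====
-- the 'for i in prefix_array[:1:-1]' loop with its early return
def pvGoA (cs : List Char) : List (List Char) → Option (List Char)
  | [] => none
  | p :: rest =>
    if 1 < PySem.Chars.count cs p then
      some (PySem.List.slice cs none
        (some ((p.length : Int) + PySem.Chars.find (PySem.List.slice cs (some (p.length : Int)) none) p)))
    else pvGoA cs rest

def quick_remove_repeated_phrases (s : String) : String :=
  let cs := s.toList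
  let prefix_array := (PySem.List.pyRange 0 (PySem.List.len cs) 1).foldl
      (fun acc i => acc ++ [PySem.List.slice cs none (some i)]) []
  match pvGoA cs ((PySem.List.slice? prefix_array none (some 1) (-1)).getD []) with
  | some r => String.ofList r
  | none => s

-- ===== PORT B =====
-- the inner 'while j + k < n and s[j + k] == s[k]: k += 1' loop
def pvBLcp (cs : List Char) (j k : Int) : Int :=
  if h : j + k < cs.length ∧ PySem.List.pyGet? cs (j + k) = PySem.List.pyGet? cs k then
    pvBLcp cs j (k + 1)
  else k
termination_by (cs.length - (j + k)).toNat
decreasing_by omega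

def quick_remove_repeated_phrases_alt (s : String) : String :=
  let cs := s.toList
  let best := (PySem.List.pyRange 1 (PySem.List.len cs) 1).foldl
      (fun best j => if best < min j (pvBLcp cs j 0) then min j (pvBLcp cs j 0) else best) 0
  if best < 2 then s
  else String.ofList (PySem.List.slice cs none
    (some (PySem.Chars.findFrom cs (PySem.List.slice cs none (some best)) best none)))

-- ===== PRECONDITION & SPEC =====
def Spec_quick_remove_repeated_phrases (s : String) (out : String) : Prop := out = quick_remove_repeated_phrases_alt s
instance (s : String) (out : String) : Decidable (Spec_quick_remove_repeated_phrases s out) := by unfold Spec_quick_remove_repeated_phrases; infer_instance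

-- ===== CLAIM (what is proved, stated in full; the proofs are below) =====
def Claim_equal_quick_remove_repeated_phrases : Prop := ∀ (s : String), Dom_quick_remove_repeated_phrases s → Spec_quick_remove_repeated_phrases s (quick_remove_repeated_phrases s)

-- ===== LEMMAS AND PROOFS =====

theorem go_cons (sub : List Char) (fuel : Nat) (h : Char) (t : List Char) (acc : Nat) :
    PySem.Chars.count.go sub (fuel+1) (h :: t) acc =
      if sub.isPrefixOf (h :: t) then PySem.Chars.count.go sub fuel ((h::t).drop sub.length) (acc+1)
      else PySem.Chars.count.go sub fuel t acc := by
  rw [PySem.Chars.count.go]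
theorem go_nil (sub : List Char) (fuel acc : Nat) : PySem.Chars.count.go sub fuel [] acc = acc := by
  cases fuel <;> rw [PySem.Chars.count.go] <;> simp
theorem go_zero (sub : List Char) (s : List Char) (acc : Nat) : PySem.Chars.count.go sub 0 s acc = acc := by
  rw [PySem.Chars.count.go]

theorem go_acc (sub : List Char) (fuel : Nat) : ∀ (s : List Char) (acc : Nat),
    PySem.Chars.count.go sub fuel s acc = acc + PySem.Chars.count.go sub fuel s 0 := by
  induction fuel with
  | zero => intro s acc; rw [go_zero, go_zero]; omega
  | succ fuel ih =>
    intro s acc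
    cases s with
    | nil => rw [go_nil, go_nil]; omega
    | cons h t =>
      rw [go_cons, go_cons]
      split
      · rw [ih _ (acc+1), ih _ (0+1)]; omega
      · rw [ih t acc]

theorem go_pos (sub : List Char) (hsub : sub ≠ []) (fuel : Nat) : ∀ (s : List Char),
    s.length ≤ fuel → (0 < PySem.Chars.count.go sub fuel s 0 ↔ sub <:+: s) := by
  induction fuel with
  | zero =>
    intro s hs
    have : s = [] := List.length_eq_zero_iff.mp (Nat.le_zero.mp hs)
    subst this
    rw [go_zero]
    simp [hsub]
  | succ fuel ih =>
    intro s hs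
    cases s with
    | nil => rw [go_nil]; simp [hsub]
    | cons h t =>
      rw [go_cons]
      rw [List.infix_cons_iff]
      by_cases hp : sub.isPrefixOf (h :: t)
      · simp only [hp, if_true]
        rw [go_acc]
        constructor
        · intro _; exact Or.inl (List.isPrefixOf_iff_prefix.mp hp)
        · intro _; omega
      · have hp' : sub.isPrefixOf (h :: t) = false := by simp only [Bool.not_eq_true] at hp; exact hp
        simp only [hp']
        rw [if_neg (by simp)]
        rw [ih t (by simpa using hs)]
        have : ¬ sub <+: (h :: t) := fun hc => hp (List.isPrefixOf_iff_prefix.mpr hc)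
        tauto

-- A's test ↔ the prefix of length l occurs again at position ≥ l
theorem count_lt_iff (cs : List Char) (l : Nat) (hl1 : 1 ≤ l) (hl : l < cs.length) :
    1 < PySem.Chars.count cs (cs.take l) ↔ (cs.take l) <:+: cs.drop l := by
  have hne : cs.take l ≠ [] := by
    have : (cs.take l).length = l := by rw [List.length_take]; omega
    intro h; rw [h] at this; simp at this; omega
  have hlen : (cs.take l).length = l := by rw [List.length_take]; omega
  rw [PySem.Chars.count]
  rw [if_neg (by simpa [List.isEmpty_iff] using hne)]
  obtain ⟨c, t, hct⟩ : ∃ c t, cs = c :: t := by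
    cases cs with
    | nil => simp at hl
    | cons c t => exact ⟨c, t, rfl⟩
  obtain ⟨fuel, hfuel⟩ : ∃ fuel, cs.length = fuel + 1 := ⟨cs.length - 1, by omega⟩
  rw [hfuel]
  rw [hct, go_cons]
  rw [if_pos (by rw [← hct]; exact List.isPrefixOf_iff_prefix.mpr (List.take_prefix l cs))]
  rw [← hct, hlen]
  rw [go_acc]
  rw [← go_pos (cs.take l) hne fuel (cs.drop l) (by rw [List.length_drop]; omega)]
  omega

theorem slice?_rev2 {α : Type} (xs : List α) :
    PySem.List.slice? xs none (some 1) (-1) = some ((xs.drop 2).reverse) := by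
  rcases xs with _|⟨a, xs⟩
  · simp [PySem.List.slice?, PySem.List.sliceIndices]
  rcases xs with _|⟨b, t⟩
  · simp [PySem.List.slice?, PySem.List.sliceIndices]
  · simp only [PySem.List.slice?, PySem.List.sliceIndices]
    rw [if_neg (by norm_num)]
    norm_num
    rcases Nat.eq_zero_or_pos t.length with h0 | hpos
    · simp [List.length_eq_zero_iff.mp h0]
    · rw [if_pos hpos]
      apply List.ext_getElem (by simp)
      intro i h1 h2
      simp only [List.getElem_map, List.getElem_range, List.getElem_reverse]
      have hidx : ((t.length : Int) + 1 + -(i : Int)).toNat = (t.length - 1 - i) + 2 := by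
        simp at h1; omega
      rw [getElem_congr rfl hidx (by simp)]
      simp

theorem pvBLcp_spec (cs : List Char) (j : Nat) : ∀ (k : Nat),
    ∃ r : Nat, pvBLcp cs (j : Int) (k : Int) = (r : Int) ∧ k ≤ r ∧
      (∀ i, k ≤ i → i < r → j + i < cs.length ∧ cs[j+i]? = cs[i]?) ∧
      ¬((j + r < cs.length) ∧ cs[j+r]? = cs[r]?) := by
  intro k
  induction hm : cs.length - (j + k) using Nat.strong_induction_on generalizing k with
  | _ m ih =>
  rw [pvBLcp]
  by_cases hc : (j : Int) + k < cs.length ∧ PySem.List.pyGet? cs ((j:Int) + k) = PySem.List.pyGet? cs k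
  · rw [dif_pos hc]
    obtain ⟨hlt, heq⟩ := hc
    have hjk : j + k < cs.length := by exact_mod_cast hlt
    have heq' : cs[j+k]? = cs[k]? := by
      have h1 := PySem.List.pyGet?_natCast cs (j+k)
      have h2 := PySem.List.pyGet?_natCast cs k
      rw [show ((j:Int) + (k:Int)) = ((j+k : Nat) : Int) by push_cast; ring] at heq
      rw [h1, h2] at heq
      exact heq
    have : ((k:Int) + 1) = ((k+1 : Nat) : Int) := by push_cast; ring
    rw [this]
    obtain ⟨r, hr, hkr, hmatch, hstop⟩ := ih (cs.length - (j + (k+1))) (by omega) (k+1) rfl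
    refine ⟨r, hr, by omega, ?_, hstop⟩
    intro i hki hir
    rcases Nat.eq_or_lt_of_le hki with rfl | hlt'
    · exact ⟨hjk, heq'⟩
    · exact hmatch i hlt' hir
  · rw [dif_neg hc]
    refine ⟨k, rfl, le_refl _, by omega, ?_⟩
    intro ⟨h1, h2⟩
    apply hc
    constructor
    · exact_mod_cast h1
    · rw [show ((j:Int) + (k:Int)) = ((j+k : Nat) : Int) by push_cast; ring]
      rw [PySem.List.pyGet?_natCast, PySem.List.pyGet?_natCast]
      exact h2

theorem pvBLcp_prefix_iff (cs : List Char) (j l : Nat) (hjn : j ≤ cs.length) (hln : l ≤ cs.length) :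
    cs.take l <+: cs.drop j ↔ (l : Int) ≤ pvBLcp cs (j : Int) 0 := by
  obtain ⟨r, hr, -, hmatch, hstop⟩ := pvBLcp_spec cs j 0
  push_cast at hr
  rw [hr]
  have hmatch' : ∀ i, i < r → j + i < cs.length ∧ cs[j+i]? = cs[i]? := fun i h => hmatch i (Nat.zero_le i) h
  constructor
  · intro hpre
    have hlt : (cs.take l).length = l := by simp; omega
    have hle : l ≤ cs.length - j := by
      have := hpre.length_le
      simp at this; omega
    by_contra hcon
    push_cast at hcon
    have hrl : r < l := by exact_mod_cast by omega
    apply hstop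
    refine ⟨by omega, ?_⟩
    have heq := List.prefix_iff_eq_take.mp hpre
    have h1 : (cs.take l)[r]? = cs[r]? := by rw [List.getElem?_take, if_pos hrl]
    have h2 : (cs.drop j)[r]? = cs[j+r]? := List.getElem?_drop
    rw [heq, hlt] at h1
    rw [List.getElem?_take, if_pos hrl] at h1
    rw [← h2, h1]
  · intro hle
    have hlr : l ≤ r := by exact_mod_cast hle
    have hjl : l = 0 ∨ j + l ≤ cs.length := by
      rcases Nat.eq_zero_or_pos l with h0 | hpos
      · exact Or.inl h0
      · exact Or.inr (by have := (hmatch' (l-1) (by omega)).1; omega)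
    rw [List.prefix_iff_eq_take]
    have hlen : (cs.take l).length = l := by simp; omega
    apply List.ext_getElem?
    intro i
    rw [hlen, List.getElem?_take, List.getElem?_take]
    by_cases hi : i < l
    · rw [if_pos hi, if_pos hi, List.getElem?_drop]
      exact ((hmatch' i (by omega)).2).symm
    · rw [if_neg hi, if_neg hi]

theorem foldl_max_spec (f : Int → Int) (L : List Int) : ∀ (a : Int),
    a ≤ L.foldl (fun b x => if b < f x then f x else b) a ∧
    (∀ x ∈ L, f x ≤ L.foldl (fun b x => if b < f x then f x else b) a) ∧
    (L.foldl (fun b x => if b < f x then f x else b) a = a ∨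
      ∃ x ∈ L, f x = L.foldl (fun b x => if b < f x then f x else b) a) := by
  induction L with
  | nil => intro a; simp
  | cons y L ih =>
    intro a
    simp only [List.foldl_cons]
    obtain ⟨h1, h2, h3⟩ := ih (if a < f y then f y else a)
    by_cases hy : a < f y
    · rw [if_pos hy] at h1 h2 h3 ⊢
      refine ⟨by omega, ?_, ?_⟩
      · intro x hx
        rcases List.mem_cons.mp hx with rfl | hx
        · omega
        · exact h2 x hx
      · rcases h3 with h3 | ⟨x, hx, hfx⟩
        · exact Or.inr ⟨y, List.mem_cons_self, h3.symm⟩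
        · exact Or.inr ⟨x, List.mem_cons_of_mem _ hx, hfx⟩
    · rw [if_neg hy] at h1 h2 h3 ⊢
      refine ⟨h1, ?_, ?_⟩
      · intro x hx
        rcases List.mem_cons.mp hx with rfl | hx
        · omega
        · exact h2 x hx
      · rcases h3 with h3 | ⟨x, hx, hfx⟩
        · exact Or.inl h3
        · exact Or.inr ⟨x, List.mem_cons_of_mem _ hx, hfx⟩

theorem pvGoA_skip (cs : List Char) (ps qs : List (List Char))
    (h : ∀ p ∈ ps, ¬ 1 < PySem.Chars.count cs p) :
    pvGoA cs (ps ++ qs) = pvGoA cs qs := by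
  induction ps with
  | nil => rfl
  | cons p ps ih =>
    rw [List.cons_append, pvGoA, if_neg (h p List.mem_cons_self)]
    exact ih (fun q hq => h q (List.mem_cons_of_mem _ hq))

-- ===== VERDICT (by name: the statement is the Claim_ definition above) =====
theorem quick_remove_repeated_phrases_spec : Claim_equal_quick_remove_repeated_phrases := by
  unfold Claim_equal_quick_remove_repeated_phrases Spec_quick_remove_repeated_phrases
  intro s _
  set cs := s.toList with hcs
  set n := cs.length with hn
  -- characterize B's fold
  obtain ⟨hge, hub, hwit⟩ := foldl_max_spec (fun j => min j (pvBLcp cs j 0))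
      (PySem.List.pyRange 1 (n : Int) 1) 0
  set bf := (PySem.List.pyRange 1 (n : Int) 1).foldl
      (fun b x => if b < min x (pvBLcp cs x 0) then min x (pvBLcp cs x 0) else b) 0 with hbf
  obtain ⟨B, hB⟩ : ∃ B : Nat, bf = (B : Int) := ⟨bf.toNat, by omega⟩
  -- upper bound: any repeated prefix length l is ≤ B
  have hupper : ∀ l : Nat, 1 ≤ l → l < n → (cs.take l <:+: cs.drop l) → l ≤ B := by
    intro l hl1 hln hP
    rw [← PySem.Chars.isIn_iff_infix, ← PySem.Chars.exists_prefix_drop_iff_isIn] at hP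
    obtain ⟨m, hm⟩ := hP
    rw [List.drop_drop] at hm
    have hlen : (cs.take l).length = l := by simp; omega
    have hlenle := hm.length_le
    rw [hlen, List.length_drop] at hlenle
    set j := l + m with hj
    have hjn : j ≤ n := by omega
    have hf : (l : Int) ≤ min (j : Int) (pvBLcp cs (j : Int) 0) := by
      have := (pvBLcp_prefix_iff cs j l hjn (by omega)).mp hm
      omega
    have hmem : ((j : Nat) : Int) ∈ PySem.List.pyRange 1 (n : Int) 1 := by
      rw [PySem.List.mem_pyRange_one]
      constructor <;> [exact_mod_cast Nat.one_le_iff_ne_zero.mpr (by omega); exact_mod_cast by omega]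
    have := hub _ hmem
    simp only at this
    omega
  -- witness: if B ≥ 1 then the prefix of length B repeats
  have hwitness : 1 ≤ B → B < n ∧ cs.take B <:+: cs.drop B := by
    intro hB1
    rcases hwit with h0 | ⟨x, hx, hfx⟩
    · omega
    · rw [PySem.List.mem_pyRange_one] at hx
      obtain ⟨j, rfl⟩ : ∃ j : Nat, x = (j : Int) := ⟨x.toNat, by omega⟩
      have hj1 : 1 ≤ j := by exact_mod_cast hx.1
      have hjn : j < n := by exact_mod_cast hx.2
      rw [hB] at hfx
      have hBj : B ≤ j := by omega
      have hBlcp : (B : Int) ≤ pvBLcp cs (j : Int) 0 := by omega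
      have hpre := (pvBLcp_prefix_iff cs j B (by omega) (by omega)).mpr hBlcp
      refine ⟨by omega, ?_⟩
      rw [← PySem.Chars.isIn_iff_infix, ← PySem.Chars.exists_prefix_drop_iff_isIn]
      exact ⟨j - B, by rw [List.drop_drop, show B + (j - B) = j by omega]; exact hpre⟩
  -- the scanned list of A
  have hdrop2 : (List.range n).drop 2 = List.range' 2 (n - 2) := by
    rcases Nat.lt_or_ge n 2 with h2 | h2
    · interval_cases n <;> rfl
    · have hsp : List.range n = List.range' 0 2 ++ List.range' 2 (n - 2) := by
        rw [List.range_eq_range',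
          show List.range' 2 (n - 2) = List.range' (0 + 1 * 2) (n - 2) from by norm_num,
          List.range'_append, show 2 + (n - 2) = n by omega]
      rw [hsp]
      exact List.drop_left' rfl
  have hA : quick_remove_repeated_phrases s =
      match pvGoA cs ((List.range' 2 (n - 2)).reverse.map (fun l => cs.take l)) with
      | some r => String.ofList r
      | none => s := by
    rw [quick_remove_repeated_phrases]
    simp only [← hcs, PySem.List.len_eq, ← hn, PySem.List.pyRange_zero_natCast,
      List.foldl_map, PySem.List.foldl_append_singleton_eq_map, List.nil_append,
      slice?_rev2, Option.getD_some]
    rw [show (fun x : Nat => PySem.List.slice cs none (some (x : Int)))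
        = (fun k : Nat => cs.take k) from funext (fun k => PySem.List.slice_to_natCast cs k),
      ← List.map_drop, hdrop2, ← List.map_reverse]
  have hBside : quick_remove_repeated_phrases_alt s =
      if bf < 2 then s
      else String.ofList (PySem.List.slice cs none
        (some (PySem.Chars.findFrom cs (PySem.List.slice cs none (some bf)) bf none))) := by
    rw [quick_remove_repeated_phrases_alt]
    simp only [← hcs, PySem.List.len_eq, ← hn, ← hbf]
  by_cases hB2 : 2 ≤ B
  · -- a repeated prefix of length B exists; both sides truncate at its next occurrence
    obtain ⟨hBn, hPB⟩ := hwitness (by omega)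
    have hsplit : List.range' 2 (n - 2)
        = (List.range' 2 (B - 2) ++ [B]) ++ List.range' (B + 1) (n - 1 - B) := by
      have h1 : List.range' 2 (B - 2) ++ [B] = List.range' 2 (B - 1) := by
        rw [show B - 1 = (B - 2) + 1 by omega, List.range'_concat,
          show 2 + 1 * (B - 2) = B by omega]
      rw [h1, show (List.range' (B + 1) (n - 1 - B) : List Nat)
            = List.range' (2 + 1 * (B - 1)) (n - 1 - B) from by
          rw [show 2 + 1 * (B - 1) = B + 1 by omega],
        List.range'_append, show (B - 1) + (n - 1 - B) = n - 2 by omega]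
    rw [hA, hsplit, hBside, if_neg (by omega)]
    rw [List.reverse_append, List.reverse_append, List.reverse_singleton,
      List.map_append, pvGoA_skip]
    · rw [List.singleton_append, List.map_cons, pvGoA]
      rw [if_pos ((count_lt_iff cs B (by omega) hBn).mpr hPB)]
      have hlen : (cs.take B).length = B := by simp; omega
      rw [hlen, PySem.List.slice_from_natCast, hB, PySem.List.slice_to_natCast,
        PySem.Chars.findFrom_natCast cs (cs.take B) B (by omega)]
      have hfind : 0 ≤ PySem.Chars.find (cs.drop B) (cs.take B) :=
        (PySem.Chars.find_nonneg_iff _ _).mpr hPB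
      rw [if_neg (by omega)]
    · intro p hp
      rw [List.mem_map] at hp
      obtain ⟨l, hl, rfl⟩ := hp
      rw [List.mem_reverse, List.mem_range'] at hl
      obtain ⟨i, hi, rfl⟩ := hl
      rw [count_lt_iff cs _ (by omega) (by omega)]
      intro hP
      have := hupper _ (by omega) (by omega) hP
      omega
  · -- no repeated prefix of length ≥ 2
    have hnone : pvGoA cs ((List.range' 2 (n - 2)).reverse.map (fun l => cs.take l)) = none := by
      rw [show ((List.range' 2 (n - 2)).reverse.map (fun l => cs.take l))
          = ((List.range' 2 (n - 2)).reverse.map (fun l => cs.take l)) ++ [] from (List.append_nil _).symm]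
      rw [pvGoA_skip]
      · rfl
      · intro p hp
        rw [List.mem_map] at hp
        obtain ⟨l, hl, rfl⟩ := hp
        rw [List.mem_reverse, List.mem_range'] at hl
        obtain ⟨i, hi, rfl⟩ := hl
        rw [count_lt_iff cs _ (by omega) (by omega)]
        intro hP
        have := hupper _ (by omega) (by omega) hP
        omega
    rw [hA, hnone, hBside, if_pos (by omega)]
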